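-- pv_equiv track=rewrite | github.com/adamwild/toolkits | cooklang-py/cooklang/hugo.py | process_steps
-- ===== SOURCE A (Python) =====
-- def process_steps(cooklang_ast: dict) -> tuple[list, list, list]:
--     newline = True
--     block_id = 0
--     markdown_steps = ""
--     markdown_ingredients_list = ""
--     markdown_cookwares_list = ""
--     while block_id < len(cooklang_ast) and (block := cooklang_ast[block_id])["type"] != "metadata":
--         if block["type"] == "newline":
--             if not newline:
--                 markdown_steps += "\n"
--                 newline = True
--             block_id += 1
--             continue
--         if newline:
--             newline = False
--             markdown_steps += "* "
--         if block["type"] == "ingredient":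
--             markdown_steps += f"{{{{< ingredient \"{block['name']}\" \"{block['quantity']} {block['units']}\" >}}}}"
--             markdown_ingredients_list += f"* {block['name']} : {block['quantity']} {block['units']}\n"
--         if block["type"] == "cookware":
--             markdown_steps += f"{block['name']}"
--             markdown_cookwares_list += f"* {block['name']}\n"
--         if block["type"] == "timer":
--             markdown_steps += f"{block['quantity']} {block['units']}"
--         if block["type"] == "text":
--             markdown_steps += block["value"]
--         block_id += 1
--     return markdown_steps, markdown_ingredients_list, markdown_cookwares_list, block_id
-- ===== SOURCE B (Python) =====
-- def process_steps(cooklang_ast: dict) -> tuple[list, list, list]: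
--     # Pass 1: stopping index = position of the first 'metadata' block (or len).
--     stop = len(cooklang_ast)
--     for i, block in enumerate(cooklang_ast):
--         if block["type"] == "metadata":
--             stop = i
--             break
--     # Pass 2: group the prefix into '* '-prefixed lines separated by newline runs.
--     lines = []
--     ingredients = []
--     cookwares = []
--     cur = None  # the line being built, or None while inside a newline run
--     for block in cooklang_ast[:stop]:
--         t = block["type"]
--         if t == "newline":
--             if cur is not None:
--                 lines.append(cur)
--                 cur = None
--         else:
--             if cur is None:
--                 cur = "* "
--             if t == "ingredient":
--                 cur += '{{< ingredient "%s" "%s %s" >}}' % (block["name"], block["quantity"], block["units"])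
--                 ingredients.append("* %s : %s %s\n" % (block["name"], block["quantity"], block["units"]))
--             elif t == "cookware":
--                 cur += block["name"]
--                 cookwares.append("* %s\n" % block["name"])
--             elif t == "timer":
--                 cur += "%s %s" % (block["quantity"], block["units"])
--             elif t == "text":
--                 cur += block["value"]
--     if cur is not None:
--         steps = "\n".join(lines + [cur])
--     else:
--         steps = "\n".join(lines) + ("\n" if lines else "")
--     return steps, "".join(ingredients), "".join(cookwares), stop
-- ===== Notes on version B (the rewrite author's own statement) =====
-- stated objective: alternative
-- what changed: Replaces A's single while-loop with a newline flag and incremental string concatenation by a two-pass decomposition: first find the first-metadata stop index, then group the prefix into '* '-lines and ingredient/cookware entries collected in lists that are joined once at the end.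
import Mathlib
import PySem

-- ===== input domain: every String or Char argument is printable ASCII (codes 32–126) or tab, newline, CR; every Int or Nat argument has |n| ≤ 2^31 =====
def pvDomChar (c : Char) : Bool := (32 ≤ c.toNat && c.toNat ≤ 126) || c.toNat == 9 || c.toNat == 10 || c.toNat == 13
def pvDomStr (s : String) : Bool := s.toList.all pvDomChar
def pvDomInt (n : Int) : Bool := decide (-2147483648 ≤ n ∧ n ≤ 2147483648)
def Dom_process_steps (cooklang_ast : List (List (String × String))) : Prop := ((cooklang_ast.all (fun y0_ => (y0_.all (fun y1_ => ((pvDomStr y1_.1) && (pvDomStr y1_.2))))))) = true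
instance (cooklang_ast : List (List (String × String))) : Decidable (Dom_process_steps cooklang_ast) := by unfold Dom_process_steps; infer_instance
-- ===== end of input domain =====

-- B is a two-pass decomposition (find the metadata stop index, then group the prefix into
-- '* '-lines collected in lists and joined at the end) instead of A's one-pass flag-driven
-- string accumulation; objective: alternative decomposition, same cost.

-- block[k] on a Python dict ported as first-match association-list lookup; a missing key is a
-- KeyError in Python, excluded by Pre_process_steps, so the "" default is never reached there.
def pyKey (b : List (String × String)) (k : String) : String :=
  ((PySem.Dict.ofList b).get? k).getD ""

-- does the dict have this key?
def hasKey (b : List (String × String)) (k : String) : Bool :=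
  ((PySem.Dict.ofList b).get? k).isSome

-- ===== PORT A =====
-- the while loop of A: state (newline flag, block_id, three accumulated strings)
def loopA : List (List (String × String)) → Bool → Int → String → String → String → String × String × String × Int
  | [], _, bid, s, il, cl => (s, il, cl, bid)
  | b :: rest, nl, bid, s, il, cl =>
    let t := pyKey b "type"
    if t == "metadata" then (s, il, cl, bid)
    else if t == "newline" then
      if nl then loopA rest nl (bid + 1) s il cl
      else loopA rest true (bid + 1) (s ++ "\n") il cl
    else
      let s := if nl then s ++ "* " else s
      let s := if t == "ingredient" then
          s ++ "{{< ingredient \"" ++ pyKey b "name" ++ "\" \"" ++ pyKey b "quantity" ++ " " ++ pyKey b "units" ++ "\" >}}" else s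
      let il := if t == "ingredient" then
          il ++ "* " ++ pyKey b "name" ++ " : " ++ pyKey b "quantity" ++ " " ++ pyKey b "units" ++ "\n" else il
      let s := if t == "cookware" then s ++ pyKey b "name" else s
      let cl := if t == "cookware" then cl ++ "* " ++ pyKey b "name" ++ "\n" else cl
      let s := if t == "timer" then s ++ pyKey b "quantity" ++ " " ++ pyKey b "units" else s
      let s := if t == "text" then s ++ pyKey b "value" else s
      loopA rest false (bid + 1) s il cl

def process_steps (cooklang_ast : List (List (String × String))) : String × String × String × Int :=
  loopA cooklang_ast true 0 "" "" ""

-- ===== PORT B =====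
-- pass 1 of B: index of the first 'metadata' block (or the length)
def findStop : List (List (String × String)) → Int
  | [] => 0
  | b :: rest => if pyKey b "type" == "metadata" then 0 else findStop rest + 1

-- pass 2 of B: state (finished lines, line under construction or none, ingredient entries, cookware entries)
def loopB : List (List (String × String)) → List String → Option String → List String → List String →
    List String × Option String × List String × List String
  | [], lines, cur, ings, cks => (lines, cur, ings, cks)
  | b :: rest, lines, cur, ings, cks =>
    let t := pyKey b "type"
    if t == "newline" then
      match cur with
      | some c => loopB rest (lines ++ [c]) none ings cks
      | none => loopB rest lines none ings cks
    else
      let c := cur.getD "* "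
      if t == "ingredient" then
        loopB rest lines
          (some (c ++ "{{< ingredient \"" ++ pyKey b "name" ++ "\" \"" ++ pyKey b "quantity" ++ " " ++ pyKey b "units" ++ "\" >}}"))
          (ings ++ ["* " ++ pyKey b "name" ++ " : " ++ pyKey b "quantity" ++ " " ++ pyKey b "units" ++ "\n"]) cks
      else if t == "cookware" then
        loopB rest lines (some (c ++ pyKey b "name")) ings (cks ++ ["* " ++ pyKey b "name" ++ "\n"])
      else if t == "timer" then
        loopB rest lines (some (c ++ pyKey b "quantity" ++ " " ++ pyKey b "units")) ings cks
      else if t == "text" then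
        loopB rest lines (some (c ++ pyKey b "value")) ings cks
      else
        loopB rest lines (some c) ings cks

def process_steps_alt (cooklang_ast : List (List (String × String))) : String × String × String × Int :=
  let stop := findStop cooklang_ast
  let pre := PySem.List.slice cooklang_ast none (some stop)   -- cooklang_ast[:stop]
  let r := loopB pre [] none [] []
  let steps :=
    match r.2.1 with
    | some c => PySem.Str.join "\n" (r.1 ++ [c])
    | none => PySem.Str.join "\n" r.1 ++ (if r.1.isEmpty then "" else "\n")
  (steps, PySem.Str.join "" r.2.2.1, PySem.Str.join "" r.2.2.2, stop)

-- ===== PRECONDITION & SPEC =====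
-- does this block carry every key its type makes the Python read?
def blockKeysOk (b : List (String × String)) (t : String) : Bool :=
  if t == "ingredient" then
    hasKey b "name" && hasKey b "quantity" && hasKey b "units"
  else if t == "cookware" then hasKey b "name"
  else if t == "timer" then hasKey b "quantity" && hasKey b "units"
  else if t == "text" then hasKey b "value"
  else true

-- every block up to (and including) the first 'metadata' one has a "type" key and the keys its type needs
def preOk : List (List (String × String)) → Bool
  | [] => true
  | b :: rest =>
    match (PySem.Dict.ofList b).get? "type" with
    | none => false
    | some t => if t == "metadata" then true else blockKeysOk b t && preOk rest

-- Pre_ excludes exactly the inputs on which the Python A raises KeyError (a block it reads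
-- lacks "type" or a field its type makes A read); A returns on every other input.
def Pre_process_steps (cooklang_ast : List (List (String × String))) : Prop :=
  preOk cooklang_ast = true
instance (cooklang_ast : List (List (String × String))) : Decidable (Pre_process_steps cooklang_ast) := by
  unfold Pre_process_steps; infer_instance

def pvWitness_process_steps : (List (List (String × String))) :=
  [[("type", "metadata")]]

def Spec_process_steps (cooklang_ast : List (List (String × String))) (out : String × String × String × Int) : Prop := out = process_steps_alt cooklang_ast
instance (cooklang_ast : List (List (String × String))) (out : String × String × String × Int) : Decidable (Spec_process_steps cooklang_ast out) := by unfold Spec_process_steps; infer_instance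

-- ===== CLAIM (what is proved, stated in full; the proofs are below) =====
def Claim_equal_process_steps : Prop := ∀ (cooklang_ast : List (List (String × String))), Dom_process_steps cooklang_ast → Pre_process_steps cooklang_ast → Spec_process_steps cooklang_ast (process_steps cooklang_ast)

-- ===== LEMMAS AND PROOFS =====
-- the prefix of the list A actually walks (everything before the first 'metadata' block)
def takePre : List (List (String × String)) → List (List (String × String))
  | [] => []
  | b :: rest => if pyKey b "type" == "metadata" then [] else b :: takePre rest

lemma findStop_nonneg (l : List (List (String × String))) : 0 ≤ findStop l := by
  induction l with
  | nil => simp [findStop]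
  | cons b rest ih => simp only [findStop]; split <;> omega

lemma take_findStop (l : List (List (String × String))) :
    List.take (findStop l).toNat l = takePre l := by
  induction l with
  | nil => simp [takePre]
  | cons b rest ih =>
    simp only [findStop, takePre]
    split
    · simp
    · have h := findStop_nonneg rest
      have : (findStop rest + 1).toNat = (findStop rest).toNat + 1 := by omega
      simp [this, ih]

lemma cjoin_append_singleton (l : List (List Char)) (e : List Char) :
    PySem.Chars.join [] (l ++ [e]) = PySem.Chars.join [] l ++ e := by
  induction l with
  | nil => simp [PySem.Chars.join_singleton, PySem.Chars.join_nil]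
  | cons a r ih =>
    cases r with
    | nil => simp [PySem.Chars.join_cons_cons, PySem.Chars.join_singleton]
    | cons b r' =>
      simp only [List.cons_append, PySem.Chars.join_cons_cons] at *
      simp [ih, List.append_assoc]

lemma cjoin_nl_append_singleton (l : List (List Char)) (c : List Char) :
    PySem.Chars.join ['\n'] (l ++ [c]) =
      PySem.Chars.join [] (l.map (· ++ ['\n'])) ++ c := by
  induction l with
  | nil => simp [PySem.Chars.join_singleton, PySem.Chars.join_nil]
  | cons a r ih =>
    cases r with
    | nil =>
      simp [PySem.Chars.join_cons_cons, PySem.Chars.join_singleton]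
    | cons b r' =>
      simp only [List.cons_append, PySem.Chars.join_cons_cons, List.map_cons] at *
      simp [ih, List.append_assoc]

lemma cjoin_map_nl (l : List (List Char)) (h : l ≠ []) :
    PySem.Chars.join [] (l.map (· ++ ['\n'])) = PySem.Chars.join ['\n'] l ++ ['\n'] := by
  induction l with
  | nil => simp at h
  | cons a r ih =>
    cases r with
    | nil => simp [PySem.Chars.join_singleton]
    | cons b r' =>
      simp only [List.map_cons, PySem.Chars.join_cons_cons] at *
      simp [ih, List.append_assoc]

lemma toList_inj {a b : String} (h : a.toList = b.toList) : a = b := by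
  have := congrArg String.ofList h
  simpa using this

lemma map_toList_nl (l : List String) :
    l.map (String.toList ∘ (· ++ "\n")) = (l.map String.toList).map (· ++ ['\n']) := by
  simp [Function.comp_def, String.toList_append]

lemma sjoin_append_singleton (l : List String) (e : String) :
    PySem.Str.join "" (l ++ [e]) = PySem.Str.join "" l ++ e := by
  apply toList_inj
  simp [PySem.Str.toList_join, cjoin_append_singleton]

lemma sjoin_nl_append_singleton (l : List String) (c : String) :
    PySem.Str.join "\n" (l ++ [c]) = PySem.Str.join "" (l.map (· ++ "\n")) ++ c := by
  apply toList_inj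
  have hnl : ("\n" : String).toList = ['\n'] := rfl
  rw [String.toList_append, PySem.Str.toList_join, PySem.Str.toList_join, hnl,
    List.map_append, List.map_map, map_toList_nl]
  simpa using cjoin_nl_append_singleton (l.map String.toList) c.toList

lemma sjoin_map_nl (l : List String) (h : l ≠ []) :
    PySem.Str.join "" (l.map (· ++ "\n")) = PySem.Str.join "\n" l ++ "\n" := by
  apply toList_inj
  have h' : l.map String.toList ≠ [] := by simpa using h
  have hnl : ("\n" : String).toList = ['\n'] := rfl
  have he : ("" : String).toList = ([] : List Char) := rfl
  rw [PySem.Str.toList_join, List.map_map, map_toList_nl, String.toList_append,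
    PySem.Str.toList_join, hnl, he, cjoin_map_nl (l.map String.toList) h']

-- A's steps string, expressed from B's state
def pref (lines : List String) (cur : Option String) : String :=
  PySem.Str.join "" (lines.map (· ++ "\n")) ++ cur.getD ""

lemma loopA_eq (blocks : List (List (String × String))) :
    ∀ (lines : List String) (cur : Option String) (ings cks : List String) (bid : Int),
    loopA blocks cur.isNone bid (pref lines cur) (PySem.Str.join "" ings) (PySem.Str.join "" cks)
      = (let r := loopB (takePre blocks) lines cur ings cks;
         (pref r.1 r.2.1, PySem.Str.join "" r.2.2.1, PySem.Str.join "" r.2.2.2, bid + findStop blocks)) := by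
  induction blocks with
  | nil => intro lines cur ings cks bid; simp [loopA, loopB, takePre, findStop]
  | cons b rest ih =>
    intro lines cur ings cks bid
    simp only [loopA, takePre, findStop]
    by_cases hm : pyKey b "type" == "metadata"
    · simp [hm, loopB]
    · by_cases hn : pyKey b "type" == "newline"
      · cases cur with
        | none =>
          have harith : bid + 1 + findStop rest = bid + (findStop rest + 1) := by ring
          simpa [loopB, hm, hn, harith] using ih lines none ings cks (bid + 1)
        | some c =>
          have hp : pref lines (some c) ++ "\n" = pref (lines ++ [c]) none := by
            simp [pref, sjoin_append_singleton, String.append_assoc]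
          have harith : bid + 1 + findStop rest = bid + (findStop rest + 1) := by ring
          simpa [loopB, hm, hn, hp, harith] using ih (lines ++ [c]) none ings cks (bid + 1)
      · -- content block: the five disjoint type cases, with the current line open or not
        have harith : bid + 1 + findStop rest = bid + (findStop rest + 1) := by ring
        obtain ⟨t, hty⟩ : ∃ t, pyKey b "type" = t := ⟨_, rfl⟩
        rw [hty] at hm hn ⊢
        by_cases hi : t = "ingredient"
        · subst hi
          cases cur with
          | none =>
            simpa [loopB, hty, pref, sjoin_append_singleton, String.append_assoc, harith] using
              ih lines (some ("* " ++ "{{< ingredient \"" ++ pyKey b "name" ++ "\" \"" ++ pyKey b "quantity" ++ " " ++ pyKey b "units" ++ "\" >}}"))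
                (ings ++ ["* " ++ pyKey b "name" ++ " : " ++ pyKey b "quantity" ++ " " ++ pyKey b "units" ++ "\n"]) cks (bid + 1)
          | some c =>
            simpa [loopB, hty, pref, sjoin_append_singleton, String.append_assoc, harith] using
              ih lines (some (c ++ "{{< ingredient \"" ++ pyKey b "name" ++ "\" \"" ++ pyKey b "quantity" ++ " " ++ pyKey b "units" ++ "\" >}}"))
                (ings ++ ["* " ++ pyKey b "name" ++ " : " ++ pyKey b "quantity" ++ " " ++ pyKey b "units" ++ "\n"]) cks (bid + 1)
        · by_cases hc : t = "cookware"
          · subst hc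
            cases cur with
            | none =>
              simpa [loopB, hty, pref, sjoin_append_singleton, String.append_assoc, harith] using
                ih lines (some ("* " ++ pyKey b "name")) ings (cks ++ ["* " ++ pyKey b "name" ++ "\n"]) (bid + 1)
            | some c =>
              simpa [loopB, hty, pref, sjoin_append_singleton, String.append_assoc, harith] using
                ih lines (some (c ++ pyKey b "name")) ings (cks ++ ["* " ++ pyKey b "name" ++ "\n"]) (bid + 1)
          · by_cases htm : t = "timer"
            · subst htm
              cases cur with
              | none =>
                simpa [loopB, hty, pref, sjoin_append_singleton, String.append_assoc, harith] using
                  ih lines (some ("* " ++ pyKey b "quantity" ++ " " ++ pyKey b "units")) ings cks (bid + 1)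
              | some c =>
                simpa [loopB, hty, pref, sjoin_append_singleton, String.append_assoc, harith] using
                  ih lines (some (c ++ pyKey b "quantity" ++ " " ++ pyKey b "units")) ings cks (bid + 1)
            · by_cases hx : t = "text"
              · subst hx
                cases cur with
                | none =>
                  simpa [loopB, hty, pref, sjoin_append_singleton, String.append_assoc, harith] using
                    ih lines (some ("* " ++ pyKey b "value")) ings cks (bid + 1)
                | some c =>
                  simpa [loopB, hty, pref, sjoin_append_singleton, String.append_assoc, harith] using
                    ih lines (some (c ++ pyKey b "value")) ings cks (bid + 1)
              · have hi' : (t == "ingredient") = false := by simp [hi]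
                have hc' : (t == "cookware") = false := by simp [hc]
                have ht' : (t == "timer") = false := by simp [htm]
                have hx' : (t == "text") = false := by simp [hx]
                cases cur with
                | none =>
                  simpa [loopB, hty, pref, hm, hn, hi', hc', ht', hx', String.append_assoc, harith] using
                    ih lines (some "* ") ings cks (bid + 1)
                | some c =>
                  simpa [loopB, hty, pref, hm, hn, hi', hc', ht', hx', String.append_assoc, harith] using
                    ih lines (some c) ings cks (bid + 1)

-- ===== VERDICT (by name: the statement is the Claim_ definition above) =====
theorem process_steps_spec : Claim_equal_process_steps := by
  intro ast _ _
  unfold Spec_process_steps process_steps process_steps_alt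
  simp only []
  rw [PySem.List.slice_to ast (findStop_nonneg ast), take_findStop]
  have hj0 : PySem.Str.join "" ([] : List String) = "" := by
    simp [PySem.Str.join, PySem.Chars.join_nil]
  have hsteps : ∀ (l : List String) (c? : Option String),
      pref l c? = (match c? with
        | some c => PySem.Str.join "\n" (l ++ [c])
        | none => PySem.Str.join "\n" l ++ (if l.isEmpty then "" else "\n")) := by
    intro l c?
    cases c? with
    | some c => simp [pref, sjoin_nl_append_singleton]
    | none =>
      cases l with
      | nil => simp [pref, PySem.Str.join, PySem.Chars.join_nil]
      | cons a r =>
        simp only [pref, Option.getD]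
        rw [sjoin_map_nl (a :: r) (by simp)]
        simp
  have hjn : PySem.Str.join "\n" ([] : List String) = "" := by
    simp [PySem.Str.join, PySem.Chars.join_nil]
  have h := loopA_eq ast [] none [] [] 0
  simp only [hsteps] at h
  simpa [hj0, hjn] using h
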